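-- pv_equiv track=rewrite | github.com/DaeWon9/PS | 프로그래머스/3/258707. n ＋ 1 카드게임/n ＋ 1 카드게임.py | solution
-- ===== SOURCE A (Python) =====
-- from itertools import combinations
--
-- def get_pair_card(cur_card_list, target_sum):
--     list_len = len(cur_card_list)
--     for pivot in range(list_len):
--         for match in range(pivot + 1, list_len):
--             if (cur_card_list[pivot] + cur_card_list[match] == target_sum):
--                 return [pivot, match]
--     return [-1, -1]
--
-- def get_priority(card_num, target_sum, cur_card_list):
--     matched_card = target_sum - card_num
--     if (matched_card in cur_card_list):
--         return 2
--     return 0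
--
-- def solution(coin, cards):
--     n = len(cards)
--     target_sum = n + 1
--     init_card_size = n // 3
--     cur_card_list = cards[:init_card_size]
--     card_index = init_card_size
--     answer = 1
--
--     usable_card_list = []
--
--     while True:
--         if (card_index > n - 1):
--             break
--
--         card1 = cards[card_index]
--         card_index += 1
--         card2 = cards[card_index]
--         card_index += 1
--
--         usable_card_list.append(card1)
--         usable_card_list.append(card2)
--
--         pair_card = get_pair_card(cur_card_list, target_sum)
--
--         is_pass = False
--
--         if (pair_card[0] != -1): # 새로운 카드를 넣지 않아도 다음단계 진행이 되는경우
--             pass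
--         else: # 새로운 카드를 넣지 않으면 게임 진행이 불가
--             if (coin >= 1):
--                 for u_card in usable_card_list:
--                     priority = get_priority(u_card, target_sum, cur_card_list)
--
--                     if (priority == 2):
--                         cur_card_list.append(u_card)
--                         usable_card_list.remove(u_card)
--                         coin -= 1
--                         is_pass = True
--                         break
--
--             # 위에서 해결이 안됐다면 2장을 뽑아서 내야함.
--
--             if (not is_pass and coin >= 2):
--                 for id1, id2 in list(combinations(range(len(usable_card_list)), 2)):
--                     if (usable_card_list[id1] + usable_card_list[id2] == target_sum):
--                         cur_card_list.append(usable_card_list[id1])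
--                         cur_card_list.append(usable_card_list[id2])
--
--                         if (id1 < id2): # id1 이 항상 크도록 설정
--                             id1, id2 = id2, id1
--
--                         usable_card_list.pop(id1)
--                         usable_card_list.pop(id2)
--                         coin -= 2
--                         break
--
--         pair_card = get_pair_card(cur_card_list, target_sum)
--
--         if (pair_card[0] == -1):
--             break
--
--         index_1 = pair_card[0]
--         index_2 = pair_card[1]
--
--         if (index_1 < index_2): # index_1 이 항상 크도록 설정
--             index_1, index_2 = index_2, index_1
--
--         cur_card_list.pop(index_1)
--         cur_card_list.pop(index_2)
--
--         answer += 1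
--
--     return answer
-- ===== SOURCE B (Python) =====
-- from collections import Counter
--
-- def _first_pair(lst, target):
--     # First (p, q) in lexicographic order with p < q and lst[p] + lst[q] == target:
--     # one pass with a multiset (Counter) of the not-yet-visited suffix for O(1) complement tests.
--     suffix = Counter(lst)
--     for p, v in enumerate(lst):
--         suffix[v] -= 1
--         c = target - v
--         if suffix[c] > 0:
--             return (p, (p + 1) + lst[p + 1:].index(c))
--     return None
--
-- def _play_round(coin, target, cur, usable):
--     # If no pair is currently playable, buy the first priority card (its complement is
--     # already held), else buy the first two usable cards completing a pair.
--     # Returns (coin, cur, usable) updated (fresh lists; arguments are not mutated).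
--     if _first_pair(cur, target) is None:
--         moved = None
--         if coin >= 1:
--             in_cur = set(cur)
--             moved = next((u for u in usable if target - u in in_cur), None)
--         if moved is not None:
--             rest = usable.copy()
--             rest.remove(moved)
--             return coin - 1, cur + [moved], rest
--         if coin >= 2:
--             pr = _first_pair(usable, target)
--             if pr is not None:
--                 i, j = pr
--                 a, b = usable[i], usable[j]
--                 rest = usable.copy()
--                 del rest[j]
--                 del rest[i]
--                 return coin - 2, cur + [a] + [b], rest
--     return coin, cur, usable
--
-- def solution(coin, cards):
--     n = len(cards)
--     target = n + 1
--     cur = cards[:n // 3]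
--     usable = []
--     answer = 1
--     idx = n // 3
--     while idx < n:
--         usable = usable + [cards[idx]] + [cards[idx + 1]]
--         idx += 2
--         coin, cur, usable = _play_round(coin, target, cur, usable)
--         pair = _first_pair(cur, target)
--         if pair is None:
--             break
--         i, j = pair
--         cur = cur.copy()
--         del cur[j]
--         del cur[i]
--         answer += 1
--     return answer
-- ===== Notes on version B (the rewrite author's own statement) =====
-- stated objective: faster
-- what changed: A rescans all index pairs of the hand (and of the bought cards) with two nested loops each round and tests priority membership by a linear 'in' scan; B finds the same first (pivot, match) pair in one pass using a Counter of the not-yet-visited suffix for O(1) complement lookups and tests priority membership against a set of the hand, preserving A's exact index tie-breaks.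
-- outside the precondition, e.g. on solution(0, [1, 1, 1, 1]): A returns 1, B returns 1
import Mathlib
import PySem

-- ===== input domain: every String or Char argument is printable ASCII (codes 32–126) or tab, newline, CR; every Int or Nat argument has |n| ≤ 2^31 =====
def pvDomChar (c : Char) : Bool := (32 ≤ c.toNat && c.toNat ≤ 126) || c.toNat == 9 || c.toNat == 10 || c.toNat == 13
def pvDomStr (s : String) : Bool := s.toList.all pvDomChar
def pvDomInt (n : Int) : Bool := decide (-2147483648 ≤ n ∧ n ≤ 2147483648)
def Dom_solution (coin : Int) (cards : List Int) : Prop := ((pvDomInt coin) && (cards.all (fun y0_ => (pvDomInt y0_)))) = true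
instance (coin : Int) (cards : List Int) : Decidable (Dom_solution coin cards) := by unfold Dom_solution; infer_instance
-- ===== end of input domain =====

-- B replaces A's O(k^2) nested index scans (run per round) by a one-pass complement lookup in a
-- suffix multiset (collections.Counter), keeping A's exact (pivot, match) tie-break.
-- Both programs only read/pop indices that are in range, so the total pyGetD/pop?-getD forms are exact.

-- ===== PORT A =====
-- Python 'xs.pop(i)' / 'del xs[i]' with the value discarded (only in-range indices are popped)
def delAt (xs : List Int) (i : Int) : List Int :=
  ((PySem.List.pop? xs i).map Prod.snd).getD xs

-- get_pair_card: nested scan over index pairs, first hit wins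
def getPairCard (cur : List Int) (target : Int) : List Int :=
  match (PySem.List.pyRange 0 (PySem.List.len cur)).findSome? (fun pivot =>
      (PySem.List.pyRange (pivot + 1) (PySem.List.len cur)).findSome? (fun m =>
        if PySem.List.pyGetD cur pivot 0 + PySem.List.pyGetD cur m 0 = target then
          some [pivot, m] else none)) with
  | some r => r
  | none => [-1, -1]

-- get_priority
def getPriority (cardNum : Int) (targetSum : Int) (cur : List Int) : Int :=
  if (targetSum - cardNum) ∈ cur then 2 else 0

-- the body between drawing the two cards and the final pair test of A's while-loop
-- (named so that the loop recursion stays readable; every step is A's, in A's order)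
def stepA (coin target : Int) (cur usable1 : List Int) : Int × List Int × List Int :=
  let pair := getPairCard cur target
  if PySem.List.pyGetD pair 0 0 ≠ -1 then (coin, cur, usable1)
  else
    let found := if coin ≥ 1 then
        usable1.find? (fun u => getPriority u target cur == 2) else none
    match found with
    | some u => (coin - 1, cur ++ [u], (PySem.List.remove? usable1 u).getD usable1)
    | none =>
      if coin ≥ 2 then
        match (PySem.List.pyRange 0 (PySem.List.len usable1)).findSome? (fun id1 =>
            (PySem.List.pyRange (id1 + 1) (PySem.List.len usable1)).findSome? (fun id2 =>
              if PySem.List.pyGetD usable1 id1 0 + PySem.List.pyGetD usable1 id2 0 = target then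
                some (id1, id2) else none)) with
        | some pr =>
          let cur2 := cur ++ [PySem.List.pyGetD usable1 pr.1 0] ++ [PySem.List.pyGetD usable1 pr.2 0]
          let sw := if pr.1 < pr.2 then (pr.2, pr.1) else (pr.1, pr.2)
          (coin - 2, cur2, delAt (delAt usable1 sw.1) sw.2)
        | none => (coin, cur, usable1)
      else (coin, cur, usable1)

-- the while-True loop of A; fuel strictly dominates the number of iterations (cards.length + 1 at entry)
def solutionLoop (cards : List Int) (n target : Int) :
    Nat → Int → List Int → List Int → Int → Int → Int
  | 0, _, _, _, _, answer => answer
  | fuel + 1, coin, cur, usable, cardIndex, answer =>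
    if cardIndex > n - 1 then answer else
    let usable1 := usable ++ [PySem.List.pyGetD cards cardIndex 0]
        ++ [PySem.List.pyGetD cards (cardIndex + 1) 0]
    let st := stepA coin target cur usable1
    let pair2 := getPairCard st.2.1 target
    if PySem.List.pyGetD pair2 0 0 = -1 then answer else
    let index1 := PySem.List.pyGetD pair2 0 0
    let index2 := PySem.List.pyGetD pair2 1 0
    let sw := if index1 < index2 then (index2, index1) else (index1, index2)
    solutionLoop cards n target fuel st.1 (delAt (delAt st.2.1 sw.1) sw.2) st.2.2
      (cardIndex + 2) (answer + 1)

def solution (coin : Int) (cards : List Int) : Int :=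
  let n := PySem.List.len cards
  let target := n + 1
  let initCardSize := PySem.Int.floordiv n 3
  let cur := PySem.List.slice cards none (some initCardSize)
  solutionLoop cards n target (cards.length + 1) coin cur [] initCardSize 1

-- ===== PORT B =====
-- _first_pair: one pass; 'suffix' is the Counter of the not-yet-visited suffix of lst
def firstPairGo (lst : List Int) (target : Int) :
    List Int → Int → PySem.Dict Int Int → Option (Int × Int)
  | [], _, _ => none
  | v :: rest, p, suffix =>
    let suffix' := suffix.modify v 0 (· - 1)
    let c := target - v
    if suffix'.getD c 0 > 0 then
      -- lst[p+1:].index(c); the hit exists because the suffix count of c is positive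
      some (p, (p + 1) + ((PySem.List.index? (PySem.List.slice lst (some (p + 1)) none) c).getD 0 : Nat))
    else firstPairGo lst target rest (p + 1) suffix'

def firstPair (lst : List Int) (target : Int) : Option (Int × Int) :=
  firstPairGo lst target lst 0 (PySem.Dict.counter lst)

-- _play_round
def stepB (coin target : Int) (cur usable : List Int) : Int × List Int × List Int :=
  if (firstPair cur target).isNone then
    let moved := if coin ≥ 1 then
        let inCur := PySem.Set.ofList cur
        usable.find? (fun u => PySem.Set.contains inCur (target - u))
      else none
    match moved with
    | some u => (coin - 1, cur ++ [u], (PySem.List.remove? usable u).getD usable)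
    | none =>
      if coin ≥ 2 then
        match firstPair usable target with
        | some pr =>
          (coin - 2,
           cur ++ [PySem.List.pyGetD usable pr.1 0] ++ [PySem.List.pyGetD usable pr.2 0],
           delAt (delAt usable pr.2) pr.1)
        | none => (coin, cur, usable)
      else (coin, cur, usable)
  else (coin, cur, usable)

def solutionAltLoop (cards : List Int) (n target : Int) :
    Nat → Int → List Int → List Int → Int → Int → Int
  | 0, _, _, _, _, answer => answer
  | fuel + 1, coin, cur, usable, idx, answer =>
    if idx < n then
      let usable1 := usable ++ [PySem.List.pyGetD cards idx 0]
          ++ [PySem.List.pyGetD cards (idx + 1) 0]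
      let st := stepB coin target cur usable1
      match firstPair st.2.1 target with
      | none => answer
      | some pr =>
        solutionAltLoop cards n target fuel st.1 (delAt (delAt st.2.1 pr.2) pr.1) st.2.2
          (idx + 2) (answer + 1)
    else answer

def solution_alt (coin : Int) (cards : List Int) : Int :=
  let n := PySem.List.len cards
  let target := n + 1
  let cur := PySem.List.slice cards none (some (PySem.Int.floordiv n 3))
  solutionAltLoop cards n target (cards.length + 1) coin cur [] (PySem.Int.floordiv n 3) 1

-- ===== PRECONDITION & SPEC =====
-- Pre_ excludes lists whose length ≡ 1 (mod 3): each round draws two cards, so on those lengths the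
-- draw index steps past the end and the Python raises IndexError whenever the game survives to the
-- last draw (B's Python raises identically); games on such lengths that happen to end earlier and
-- return are excluded with them, since the exact raising set is not a closed-form shape condition.
def Pre_solution (coin : Int) (cards : List Int) : Prop := (cards.length % 3) ≠ 1
instance (coin : Int) (cards : List Int) : Decidable (Pre_solution coin cards) := by unfold Pre_solution; infer_instance
def pvWitness_solution : Int × List Int := (2, [1, 2, 3, 3, 1, 2])
def Spec_solution (coin : Int) (cards : List Int) (out : Int) : Prop := out = solution_alt coin cards
instance (coin : Int) (cards : List Int) (out : Int) : Decidable (Spec_solution coin cards out) := by unfold Spec_solution; infer_instance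

-- ===== CLAIM (what is proved, stated in full; the proofs are below) =====
def Claim_equal_solution : Prop := ∀ (coin : Int) (cards : List Int), Dom_solution coin cards → Pre_solution coin cards → Spec_solution coin cards (solution coin cards)

-- ===== LEMMAS AND PROOFS =====

theorem pyGetD_pair0 (a b d : Int) : PySem.List.pyGetD [a, b] 0 d = a := rfl

theorem pyGetD_pair1 (a b d : Int) : PySem.List.pyGetD [a, b] 1 d = b := rfl

-- the inner scan 'for m in range(pivot+1, len)' finds the first index ≥ s holding the complement
theorem inner_scan_eq {γ : Type} (lst : List Int) (t : Int) (f : Int → Int → γ)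
    (p : Nat) (hp : p < lst.length) :
    ∀ (d s : Nat), lst.length - s = d →
    (PySem.List.pyRange (↑s) (PySem.List.len lst)).findSome? (fun m =>
        if PySem.List.pyGetD lst (↑p) 0 + PySem.List.pyGetD lst m 0 = t then some (f (↑p) m) else none)
    = Option.map (fun k => f (↑p) (↑(s + k))) (PySem.List.index? (lst.drop s) (t - lst[p])) := by
  have hgp : PySem.List.pyGetD lst (↑p) 0 = lst[p] := by
    simp [PySem.List.pyGetD_natCast, List.getD_eq_getElem?_getD, List.getElem?_eq_getElem hp]
  intro d
  induction d with
  | zero =>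
    intro s hs
    have hsl : lst.length ≤ s := by omega
    have h1 : (PySem.List.pyRange (↑s) (PySem.List.len lst)) = [] := by
      refine List.eq_nil_iff_forall_not_mem.mpr (fun m hm => ?_)
      rw [PySem.List.mem_pyRange_one] at hm
      rw [PySem.List.len_eq] at hm
      omega
    rw [h1, List.drop_eq_nil_of_le hsl]
    simp [PySem.List.index?_eq_idxOf?]
  | succ d ih =>
    intro s hs
    have hslt : s < lst.length := by omega
    have hcons : PySem.List.pyRange (↑s) (PySem.List.len lst)
        = ↑s :: PySem.List.pyRange (↑s + 1) (PySem.List.len lst) := by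
      refine PySem.List.pyRange_one_cons ?_
      rw [PySem.List.len_eq]; omega
    have hgs : PySem.List.pyGetD lst (↑s) 0 = lst[s] := by
      simp [PySem.List.pyGetD_natCast, List.getD_eq_getElem?_getD, List.getElem?_eq_getElem hslt]
    rw [hcons, List.findSome?_cons, List.drop_eq_getElem_cons hslt]
    by_cases hc : lst[s] = t - lst[p]
    · have hyes : PySem.List.pyGetD lst (↑p) 0 + PySem.List.pyGetD lst (↑s) 0 = t := by
        rw [hgp, hgs]; omega
      rw [if_pos hyes]
      rw [hc, PySem.List.index?_cons_self]
      simp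
    · have hno : ¬ (PySem.List.pyGetD lst (↑p) 0 + PySem.List.pyGetD lst (↑s) 0 = t) := by
        rw [hgp, hgs]; omega
      rw [if_neg hno]
      have hcast : ((s : Int) + 1) = ((s + 1 : Nat) : Int) := by push_cast; ring
      rw [hcast, ih (s + 1) (by omega), PySem.List.index?_cons_of_ne _ hc]
      cases hidx : PySem.List.index? (lst.drop (s + 1)) (t - lst[p]) with
      | none => simp
      | some k =>
        simp only [Option.map_some]
        have e : s + 1 + k = s + (k + 1) := by omega
        rw [e]

-- the one-pass Counter scan equals the remaining nested scan (suffix counter invariant)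
theorem go_scan_eq {γ : Type} (lst : List Int) (t : Int) (f : Int → Int → γ) :
    ∀ (d p : Nat) (suf : PySem.Dict Int Int),
    lst.length - p = d →
    (∀ x : Int, suf.getD x 0 = (((lst.drop p).count x : Nat) : Int)) →
    Option.map (fun pq => f pq.1 pq.2) (firstPairGo lst t (lst.drop p) (↑p) suf)
    = ((List.range' p (lst.length - p)).map (fun k : Nat => (k : Int))).findSome? (fun i =>
        (PySem.List.pyRange (i + 1) (PySem.List.len lst)).findSome? (fun m =>
          if PySem.List.pyGetD lst i 0 + PySem.List.pyGetD lst m 0 = t then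
            some (f i m) else none)) := by
  intro d
  induction d with
  | zero =>
    intro p suf hd _
    have hpl : lst.length ≤ p := by omega
    rw [List.drop_eq_nil_of_le hpl, hd]
    simp [firstPairGo]
  | succ d ih =>
    intro p suf hd hsuf
    have hp : p < lst.length := by omega
    have hdropc : lst.drop p = lst[p] :: lst.drop (p + 1) := List.drop_eq_getElem_cons hp
    have hsuf' : ∀ x : Int, ((suf.modify lst[p] 0 (· - 1)).getD x 0)
        = (((lst.drop (p + 1)).count x : Nat) : Int) := by
      intro x
      rw [PySem.Dict.getD_modify]
      have hcnt := hsuf x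
      rw [hdropc] at hcnt
      by_cases hx : x = lst[p]
      · subst hx
        rw [if_pos rfl, hcnt, List.count_cons_self]
        push_cast; ring
      · rw [if_neg hx, hcnt]
        norm_cast
        rw [List.count_cons]
        simp [Ne.symm hx]
    have hcast1 : ((p : Int) + 1) = ((p + 1 : Nat) : Int) := by push_cast; ring
    rw [hdropc, firstPairGo, hcast1]
    rw [hd, List.range'_succ, List.map_cons, List.findSome?_cons, hcast1]
    rw [inner_scan_eq lst t f p hp (lst.length - (p + 1)) (p + 1) rfl]
    by_cases hpos : ((suf.modify lst[p] 0 (· - 1)).getD (t - lst[p]) 0) > 0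
    · have hmem : (t - lst[p]) ∈ lst.drop (p + 1) := by
        have h1 := hsuf' (t - lst[p])
        rw [h1] at hpos
        have h2 : 0 < (lst.drop (p + 1)).count (t - lst[p]) := by exact_mod_cast hpos
        exact List.count_pos_iff.mp h2
      obtain ⟨k, hk⟩ : ∃ k, PySem.List.index? (lst.drop (p + 1)) (t - lst[p]) = some k := by
        cases h : PySem.List.index? (lst.drop (p + 1)) (t - lst[p]) with
        | some k => exact ⟨k, rfl⟩
        | none => rw [PySem.List.index?_eq_none_iff] at h; exact absurd hmem h
      have hslice : PySem.List.slice lst (some ((p + 1 : Nat) : Int)) none = lst.drop (p + 1) :=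
        PySem.List.slice_from_natCast lst (p + 1)
      rw [if_pos hpos, hslice, hk]
      simp only [Option.map_some, Option.getD_some]
      have e : ((p + 1 : Nat) : Int) + (k : Int) = ((p + 1 + k : Nat) : Int) := by push_cast; ring
      rw [e]
    · rw [if_neg hpos]
      have hnone : PySem.List.index? (lst.drop (p + 1)) (t - lst[p]) = none := by
        rw [PySem.List.index?_eq_none_iff]
        intro hmem
        apply hpos
        rw [hsuf' (t - lst[p])]
        exact_mod_cast List.count_pos_iff.mpr hmem
      rw [hnone]
      simp only [Option.map_none]
      have ih2 := ih (p + 1) (suf.modify lst[p] 0 (· - 1)) (by omega) hsuf'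
      rw [show lst.length - (p + 1) = d from by omega] at ih2
      rw [ih2]

theorem scan_eq {γ : Type} (lst : List Int) (t : Int) (f : Int → Int → γ) :
    (PySem.List.pyRange 0 (PySem.List.len lst)).findSome? (fun pivot =>
      (PySem.List.pyRange (pivot + 1) (PySem.List.len lst)).findSome? (fun m =>
        if PySem.List.pyGetD lst pivot 0 + PySem.List.pyGetD lst m 0 = t then
          some (f pivot m) else none))
    = Option.map (fun pq => f pq.1 pq.2) (firstPair lst t) := by
  have h0 : ∀ x : Int, (PySem.Dict.counter lst).getD x 0 = (((lst.drop 0).count x : Nat) : Int) := by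
    intro x; rw [List.drop_zero]; exact PySem.Dict.getD_counter lst x
  have hmain := go_scan_eq lst t f lst.length 0 (PySem.Dict.counter lst) (by omega) h0
  rw [List.drop_zero, Nat.cast_zero, Nat.sub_zero, ← List.range_eq_range'] at hmain
  rw [PySem.List.len_eq] at hmain
  unfold firstPair
  rw [PySem.List.len_eq, PySem.List.pyRange_zero_natCast]
  exact hmain.symm

theorem go_lt (lst : List Int) (t : Int) :
    ∀ (rest : List Int) (p0 : Int) (suf : PySem.Dict Int Int) (p q : Int),
    firstPairGo lst t rest p0 suf = some (p, q) → p0 ≤ p ∧ p < q := by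
  intro rest
  induction rest with
  | nil => intro p0 suf p q h; simp [firstPairGo] at h
  | cons v rest ih =>
    intro p0 suf p q h
    rw [firstPairGo] at h
    by_cases hpos : ((suf.modify v 0 (· - 1)).getD (t - v) 0) > 0
    · rw [if_pos hpos] at h
      simp only [Option.some.injEq, Prod.mk.injEq] at h
      obtain ⟨h1, h2⟩ := h
      omega
    · rw [if_neg hpos] at h
      have := ih (p0 + 1) _ p q h
      omega

theorem firstPair_some_lt (lst : List Int) (t : Int) (p q : Int)
    (h : firstPair lst t = some (p, q)) : 0 ≤ p ∧ p < q := by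
  have := go_lt lst t lst 0 (PySem.Dict.counter lst) p q h
  omega

theorem getPairCard_eq (cur : List Int) (t : Int) :
    getPairCard cur t = match firstPair cur t with
      | some pq => [pq.1, pq.2]
      | none => [-1, -1] := by
  unfold getPairCard
  rw [scan_eq cur t (fun i j => ([i, j] : List Int))]
  cases firstPair cur t <;> rfl

theorem pred_eq (cur : List Int) (target : Int) :
    (fun u => getPriority u target cur == 2)
    = (fun u => PySem.Set.contains (PySem.Set.ofList cur) (target - u)) := by
  funext u
  by_cases h : (target - u) ∈ cur <;> simp [getPriority, h, PySem.Set.mem_ofList]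

theorem step_eq (coin target : Int) (cur usable1 : List Int) :
    stepA coin target cur usable1 = stepB coin target cur usable1 := by
  rw [stepA, stepB]
  simp only [getPairCard_eq, scan_eq, pred_eq, Prod.mk.eta, Option.map_id']
  cases hfp : firstPair cur target with
  | some pq =>
    have h0 := (firstPair_some_lt _ _ _ _ (by rw [hfp] : firstPair cur target = some (pq.1, pq.2))).1
    simp only [pyGetD_pair0]
    rw [if_pos (by omega : (pq.1 : Int) ≠ -1)]
    simp [Option.isNone]
  | none =>
    simp only [pyGetD_pair0]
    rw [if_neg (by simp : ¬ (-1 : Int) ≠ -1)]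
    simp only [Option.isNone_none, if_true]
    cases hfound : (if coin ≥ 1 then
        usable1.find? (fun u => PySem.Set.contains (PySem.Set.ofList cur) (target - u)) else none) with
    | some u => rfl
    | none =>
      by_cases hcoin : coin ≥ 2
      · rw [if_pos hcoin, if_pos hcoin]
        cases hc : firstPair usable1 target with
        | none => rfl
        | some pq2 =>
          have hij := (firstPair_some_lt _ _ _ _ (by rw [hc] : firstPair usable1 target = some (pq2.1, pq2.2))).2
          simp only []
          rw [if_pos hij]
      · rw [if_neg hcoin, if_neg hcoin]

theorem loop_eq (cards : List Int) (n target : Int) :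
    ∀ (fuel : Nat) (coin : Int) (cur usable : List Int) (idx answer : Int),
    solutionLoop cards n target fuel coin cur usable idx answer
    = solutionAltLoop cards n target fuel coin cur usable idx answer := by
  intro fuel
  induction fuel with
  | zero => intro _ _ _ _ _; rfl
  | succ fuel ih =>
    intro coin cur usable idx answer
    rw [solutionLoop, solutionAltLoop]
    by_cases hidx : idx < n
    · rw [if_neg (by omega : ¬ idx > n - 1), if_pos hidx]
      simp only [step_eq, getPairCard_eq]
      cases hfp2 : firstPair (stepB coin target cur
          (usable ++ [PySem.List.pyGetD cards idx 0] ++ [PySem.List.pyGetD cards (idx + 1) 0])).2.1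
          target with
      | none => simp
      | some pq =>
        have hlt := firstPair_some_lt _ _ _ _ (by rw [hfp2] : firstPair _ target = some (pq.1, pq.2))
        simp only [pyGetD_pair0, pyGetD_pair1]
        rw [if_neg (by omega : ¬ (pq.1 : Int) = -1), if_pos hlt.2]
        exact ih _ _ _ _ _
    · rw [if_pos (by omega : idx > n - 1), if_neg hidx]

-- ===== VERDICT (by name: the statement is the Claim_ definition above) =====
theorem solution_spec : Claim_equal_solution := by
  intro coin cards _ _
  unfold Spec_solution solution solution_alt
  simp only [loop_eq]
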